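-- pv_equiv track=rewrite | github.com/JeffyLapter/NetworkProtocol | Client/Proxy.py | str_to_bin_ip
-- ===== SOURCE A (Python) =====
-- def str_to_bin_ip(str_ip):
--     f=''
--     b_ip=''
--     for i in str_ip:
--         if i!='.':
--             f=f+i
--         else:
--             b_ip=b_ip+bin(int(f))[2:].zfill(8)
--             f=''
--     b_ip=b_ip+bin(int(f))[2:].zfill(8)
--     return b_ip
-- ===== SOURCE B (Python) =====
-- def str_to_bin_ip(str_ip):
--     return ''.join(bin(int(p))[2:].zfill(8) for p in str_ip.split('.'))
-- ===== Notes on version B (the rewrite author's own statement) =====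
-- stated objective: idiomatic
-- what changed: Replaces the character-by-character scan with two string-concatenation accumulators and a duplicated post-loop flush by a single split('.') followed by a map-and-join over whole octet tokens.
import Mathlib
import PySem

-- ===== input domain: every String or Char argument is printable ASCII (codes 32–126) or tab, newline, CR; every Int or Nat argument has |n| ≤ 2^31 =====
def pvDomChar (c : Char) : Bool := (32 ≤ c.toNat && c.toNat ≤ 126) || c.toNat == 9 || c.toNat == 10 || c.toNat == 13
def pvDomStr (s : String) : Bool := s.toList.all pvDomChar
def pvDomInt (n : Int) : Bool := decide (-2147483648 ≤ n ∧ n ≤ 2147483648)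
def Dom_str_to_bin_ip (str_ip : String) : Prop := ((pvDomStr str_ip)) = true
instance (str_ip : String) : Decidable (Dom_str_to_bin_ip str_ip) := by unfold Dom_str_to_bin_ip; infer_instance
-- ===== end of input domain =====

-- B replaces A's per-character scan with two string accumulators (and its duplicated
-- post-loop flush) by split('.') followed by a map-and-join over whole octet tokens (idiomatic).

-- ===== PORT A =====
-- bin(int(t))[2:].zfill(8); none = int() raised ValueError (shared by both ports: both
-- Pythons contain this exact expression)
def pvOctet? (t : List Char) : Option (List Char) :=
  (PySem.Int.ofChars? t).map (fun n =>
    PySem.Chars.zfill (PySem.List.slice (PySem.Int.toBinChars0b n) (some 2) none) 8)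

-- A's for-loop: state (f, b_ip); none propagates the ValueError raised at a '.'
def pvLoopA : List Char → List Char → List Char → Option (List Char × List Char)
  | [], f, b_ip => some (f, b_ip)
  | i :: rest, f, b_ip =>
    if i ≠ '.' then pvLoopA rest (f ++ [i]) b_ip
    else
      match pvOctet? f with
      | none => none
      | some x => pvLoopA rest [] (b_ip ++ x)

def str_to_bin_ip (str_ip : String) : String :=
  String.ofList
    (match pvLoopA str_ip.toList [] [] with
     | none => []                       -- A raised; excluded by Pre_
     | some (f, b_ip) =>
       match pvOctet? f with            -- the post-loop flush
       | none => []                     -- A raised; excluded by Pre_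
       | some x => b_ip ++ x)

-- ===== PORT B =====
def str_to_bin_ip_alt (str_ip : String) : String :=
  String.ofList (((str_ip.toList.splitOn '.').map (fun p => (pvOctet? p).getD [])).flatten)

-- ===== PRECONDITION & SPEC =====
-- Pre_ excludes exactly the inputs on which A raises ValueError: some piece between dots
-- is not int()-parsable (both Pythons raise there).
def Pre_str_to_bin_ip (str_ip : String) : Prop :=
  ∀ t ∈ str_ip.toList.splitOn '.', (PySem.Int.ofChars? t).isSome = true
instance (str_ip : String) : Decidable (Pre_str_to_bin_ip str_ip) := by
  unfold Pre_str_to_bin_ip; infer_instance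

def pvWitness_str_to_bin_ip : String := "192.168.0.1"

def Spec_str_to_bin_ip (str_ip : String) (out : String) : Prop := out = str_to_bin_ip_alt str_ip
instance (str_ip : String) (out : String) : Decidable (Spec_str_to_bin_ip str_ip out) := by
  unfold Spec_str_to_bin_ip; infer_instance

-- ===== CLAIM (what is proved, stated in full; the proofs are below) =====
def Claim_equal_str_to_bin_ip : Prop := ∀ (str_ip : String), Dom_str_to_bin_ip str_ip → Pre_str_to_bin_ip str_ip → Spec_str_to_bin_ip str_ip (str_to_bin_ip str_ip)

-- ===== LEMMAS AND PROOFS =====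

theorem pvSplitOn_no_dot (f : List Char) (hf : '.' ∉ f) : f.splitOn '.' = [f] := by
  induction f with
  | nil => rfl
  | cons c cs ih =>
    have hc : c ≠ '.' := fun h => hf (h ▸ List.mem_cons_self ..)
    have h' : cs.splitOn '.' = [cs] := ih (fun h => hf (List.mem_cons_of_mem _ h))
    simp only [List.splitOn] at h' ⊢
    rw [List.splitOnP_cons, h']
    simp [hc]

theorem pvSplitOn_dot_append (f cs : List Char) (hf : '.' ∉ f) :
    (f ++ '.' :: cs).splitOn '.' = f :: cs.splitOn '.' := by
  induction f with
  | nil => simp [List.splitOn, List.splitOnP_cons]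
  | cons c f' ih =>
    have hc : c ≠ '.' := fun h => hf (h ▸ List.mem_cons_self ..)
    have h' := ih (fun h => hf (List.mem_cons_of_mem _ h))
    simp [List.splitOn, List.splitOnP_cons, hc] at h' ⊢
    simp [h']

theorem pvLoopA_eq (cs : List Char) : ∀ (f b : List Char), '.' ∉ f →
    (∀ t ∈ (f ++ cs).splitOn '.', (PySem.Int.ofChars? t).isSome = true) →
    (match pvLoopA cs f b with
     | none => []
     | some (f', b') =>
       match pvOctet? f' with
       | none => []
       | some x => b' ++ x)
    = b ++ (((f ++ cs).splitOn '.').map (fun p => (pvOctet? p).getD [])).flatten := by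
  induction cs with
  | nil =>
    intro f b hf hp
    rw [List.append_nil] at hp ⊢
    rw [pvSplitOn_no_dot f hf] at hp ⊢
    have := hp f (List.mem_singleton_self f)
    obtain ⟨x, hx⟩ := Option.isSome_iff_exists.mp
      (show (pvOctet? f).isSome = true by simpa [pvOctet?] using this)
    simp [pvLoopA, hx]
  | cons c rest ih =>
    intro f b hf hp
    by_cases hc : c = '.'
    · subst hc
      rw [pvSplitOn_dot_append f rest hf] at hp ⊢
      have hfp := hp f (List.mem_cons_self ..)
      obtain ⟨x, hx⟩ := Option.isSome_iff_exists.mp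
        (show (pvOctet? f).isSome = true by simpa [pvOctet?] using hfp)
      have ihr := ih [] (b ++ x) (by simp)
        (by simpa using fun t ht => hp t (List.mem_cons_of_mem _ ht))
      simp only [List.nil_append] at ihr
      simp only [pvLoopA, ne_eq, not_true_eq_false, if_false, hx]
      rw [ihr]
      simp [hx, List.append_assoc]
    · have hassoc : f ++ c :: rest = (f ++ [c]) ++ rest := by simp
      rw [hassoc] at hp ⊢
      have hf' : '.' ∉ f ++ [c] := by
        simp only [List.mem_append, List.mem_singleton]
        rintro (h | h)
        · exact hf h
        · exact hc h.symm
      simp only [pvLoopA, ne_eq, hc, not_false_eq_true, if_true]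
      exact ih (f ++ [c]) b hf' hp

-- ===== VERDICT (by name: the statement is the Claim_ definition above) =====
theorem str_to_bin_ip_spec : Claim_equal_str_to_bin_ip := by
  intro s _ hpre
  unfold Spec_str_to_bin_ip str_to_bin_ip str_to_bin_ip_alt
  have h := pvLoopA_eq s.toList [] [] (by simp) (by simpa using hpre)
  simp only [List.nil_append] at h
  rw [h]
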